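-- pv_equiv track=rewrite | github.com/Vyary/SoftUni | functions/password_validator.py | more_than_two_digits
-- ===== SOURCE A (Python) =====
-- def more_than_two_digits(password: str) -> bool:
--     digit_count = 0
--     for char in password:
--         if char.isdigit():
--             digit_count += 1
--             if digit_count >= 2:
--                 return True
--     return False
-- ===== SOURCE B (Python) =====
-- import re
--
-- def more_than_two_digits(password: str) -> bool:
--     # A match of \d[\s\S]*\d exists iff a digit appears and another digit appears after it.
--     return bool(re.search(r'\d[\s\S]*\d', password))
-- ===== Notes on version B (the rewrite author's own statement) =====
-- stated objective: idiomatic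
-- what changed: Replaced the explicit counting loop with early exit by a single regular-expression search for two digit characters separated by anything (re.search(r'\d[\s\S]*\d')).
import Mathlib
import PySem

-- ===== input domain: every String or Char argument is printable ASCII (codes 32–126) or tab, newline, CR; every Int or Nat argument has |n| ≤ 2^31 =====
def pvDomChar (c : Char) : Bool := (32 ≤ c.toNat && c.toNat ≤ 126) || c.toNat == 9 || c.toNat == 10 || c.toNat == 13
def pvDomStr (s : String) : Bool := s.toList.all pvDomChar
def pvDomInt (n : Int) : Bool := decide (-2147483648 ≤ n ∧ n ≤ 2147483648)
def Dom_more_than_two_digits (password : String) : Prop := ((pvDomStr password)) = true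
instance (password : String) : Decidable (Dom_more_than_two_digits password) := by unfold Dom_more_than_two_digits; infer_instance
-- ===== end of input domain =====

-- B replaces A's counting loop with a regular-expression search for two digits (idiomatic; same cost).
-- ===== PORT A =====
-- A's for-loop with digit_count and early return, as structural recursion over the characters.
def pvLoopA : List Char → Int → Bool
  | [], _ => false
  | c :: rest, cnt =>
    if PySem.Chars.isdigit c then
      if cnt + 1 ≥ 2 then true else pvLoopA rest (cnt + 1)
    else pvLoopA rest cnt

def more_than_two_digits (password : String) : Bool :=
  pvLoopA password.toList 0

-- ===== PORT B =====
-- Hand port of re.search(r'\d[\s\S]*\d', password): the engine skips the longest digit-free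
-- prefix to anchor \d at the first digit, then [\s\S]*\d succeeds iff any later char is a digit.
-- Exact for this pattern on any string (\d = isdigit on the ASCII domain).
def more_than_two_digits_alt (password : String) : Bool :=
  match password.toList.dropWhile (fun c => ¬ PySem.Chars.isdigit c) with
  | [] => false
  | _ :: rest => rest.any PySem.Chars.isdigit

-- ===== PRECONDITION & SPEC =====
def Spec_more_than_two_digits (password : String) (out : Bool) : Prop := out = more_than_two_digits_alt password
instance (password : String) (out : Bool) : Decidable (Spec_more_than_two_digits password out) := by unfold Spec_more_than_two_digits; infer_instance

-- ===== CLAIM (what is proved, stated in full; the proofs are below) =====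
def Claim_equal_more_than_two_digits : Prop := ∀ (password : String), Dom_more_than_two_digits password → Spec_more_than_two_digits password (more_than_two_digits password)

-- ===== LEMMAS AND PROOFS =====

-- ===== VERDICT (by name: the statement is the Claim_ definition above) =====
theorem pvLoopA_one (l : List Char) : pvLoopA l 1 = l.any PySem.Chars.isdigit := by
  induction l with
  | nil => rfl
  | cons c rest ih => by_cases h : PySem.Chars.isdigit c <;> simp [pvLoopA, h, ih]

theorem pvLoopA_zero (l : List Char) :
    pvLoopA l 0 = (match l.dropWhile (fun c => ¬ PySem.Chars.isdigit c) with
      | [] => false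
      | _ :: rest => rest.any PySem.Chars.isdigit) := by
  induction l with
  | nil => rfl
  | cons c rest ih =>
    by_cases h : PySem.Chars.isdigit c
    · simp [pvLoopA, h, List.dropWhile, pvLoopA_one]
    · simp [pvLoopA, h, List.dropWhile, ih]

theorem more_than_two_digits_spec : Claim_equal_more_than_two_digits := by
  intro password _
  unfold Spec_more_than_two_digits more_than_two_digits more_than_two_digits_alt
  exact pvLoopA_zero _
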